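-- pv_equiv track=rewrite | github.com/nishantsirohi23/projects | leetcode/geeks/contest3.py | count_beautiful_string_pairs
-- ===== SOURCE A (Python) =====
-- def is_beautiful_string(s):
--     freq = {}
--     for char in s:
--         freq[char] = freq.get(char, 0) + 1
--
--     odd_count = sum(1 for val in freq.values() if val % 2 != 0)
--     return odd_count <= 1
--
-- def count_beautiful_string_pairs(box):
--     n = len(box)
--     count = 0
--
--     for i in range(n - 1):
--         for j in range(i + 1, n):
--             concatenated_string = box[i] + box[j]
--             if is_beautiful_string(concatenated_string):
--                 count += 1
--
--     return count
-- ===== SOURCE B (Python) =====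
-- def count_beautiful_string_pairs(box):
--     # One pass over precomputed character-parity bitmasks with a seen-counter dict:
--     # a pair's concatenation is "beautiful" iff the two masks are equal or differ in one bit.
--     masks = []
--     for s in box:
--         m = 0
--         for ch in s:
--             m ^= 1 << ord(ch)
--         masks.append(m)
--     seen = {}
--     count = 0
--     for m in masks:
--         count += seen.get(m, 0)
--         for b in range(128):
--             count += seen.get(m ^ (1 << b), 0)
--         seen[m] = seen.get(m, 0) + 1
--     return count
-- ===== Notes on version B (the rewrite author's own statement) =====
-- stated objective: faster
-- what changed: Replaces the O(n^2) all-pairs scan that recounts character frequencies of each concatenation with a single pass: each string is reduced once to a 128-bit character-parity mask and a dict counts previously seen masks, so each string contributes via 1+128 dict lookups (equal mask or mask differing in one bit).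
import Mathlib
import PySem

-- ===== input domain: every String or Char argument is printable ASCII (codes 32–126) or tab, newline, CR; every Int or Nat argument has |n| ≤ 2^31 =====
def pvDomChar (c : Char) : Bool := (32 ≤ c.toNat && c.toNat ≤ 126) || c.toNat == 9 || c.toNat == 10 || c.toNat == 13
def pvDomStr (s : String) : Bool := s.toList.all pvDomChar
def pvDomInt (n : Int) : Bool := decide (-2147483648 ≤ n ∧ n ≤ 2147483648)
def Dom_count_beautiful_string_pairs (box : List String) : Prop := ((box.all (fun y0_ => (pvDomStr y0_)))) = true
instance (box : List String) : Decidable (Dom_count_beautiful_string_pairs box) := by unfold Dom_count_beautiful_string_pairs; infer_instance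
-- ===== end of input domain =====

-- B replaces A's all-pairs rescan of each concatenation by one pass over per-string
-- character-parity bitmasks counted in a dict (objective: faster).

-- ===== PORT A =====
def is_beautiful_string (s : String) : Bool :=
  let freq := s.toList.foldl (fun (d : PySem.Dict Char Int) char => d.insert char (d.getD char 0 + 1)) PySem.Dict.empty
  let odd_count : Int := freq.values.foldl (fun acc val => if PySem.Int.mod val 2 != 0 then acc + 1 else acc) 0
  decide (odd_count ≤ 1)

def count_beautiful_string_pairs (box : List String) : Int :=
  let n : Int := box.length
  (PySem.List.pyRange 0 (n - 1)).foldl (fun count i =>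
    (PySem.List.pyRange (i + 1) n).foldl (fun count j =>
      -- box[i], box[j]: i, j always in range here, so pyGetD is exact
      let concatenated_string := PySem.List.pyGetD box i "" ++ PySem.List.pyGetD box j ""
      if is_beautiful_string concatenated_string then count + 1 else count) count) 0

-- ===== PORT B =====
def pvStrMask (s : String) : Int :=
  s.toList.foldl (fun m ch => PySem.Int.bxor m ((1 : Int) <<< ch.toNat)) 0

def count_beautiful_string_pairs_alt (box : List String) : Int :=
  let masks : List Int := box.foldl (fun acc s => acc ++ [pvStrMask s]) []
  let res := masks.foldl (fun (st : PySem.Dict Int Int × Int) m =>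
    let seen := st.1
    let count := st.2 + seen.getD m 0
    -- b runs over range(128), so b ≥ 0 and (1 << b) is exactly (1 : Int) <<< b.toNat
    let count := (PySem.List.pyRange 0 128).foldl
      (fun c b => c + seen.getD (PySem.Int.bxor m ((1 : Int) <<< b.toNat)) 0) count
    (seen.insert m (seen.getD m 0 + 1), count)) (PySem.Dict.empty, 0)
  res.2

-- ===== PRECONDITION & SPEC =====
def Spec_count_beautiful_string_pairs (box : List String) (out : Int) : Prop := out = count_beautiful_string_pairs_alt box
instance (box : List String) (out : Int) : Decidable (Spec_count_beautiful_string_pairs box out) := by unfold Spec_count_beautiful_string_pairs; infer_instance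

-- ===== CLAIM (what is proved, stated in full; the proofs are below) =====
def Claim_equal_count_beautiful_string_pairs : Prop := ∀ (box : List String), Dom_count_beautiful_string_pairs box → Spec_count_beautiful_string_pairs box (count_beautiful_string_pairs box)

-- ===== LEMMAS AND PROOFS =====

-- Nat-level parity mask of a character list
def pvNmask (w : List Char) : Nat := w.foldl (fun m c => m ^^^ (2 ^ c.toNat)) 0

-- pair count grouped by the FIRST element of each pair (A's loop shape)
def pvPairS : List String → Int
  | [] => 0
  | x :: xs => (xs.countP (fun y => is_beautiful_string (x ++ y)) : Int) + pvPairS xs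

-- pair count grouped by the SECOND element, scanned against a growing prefix (B's loop shape)
def pvPairT : List String → List String → Int
  | _, [] => 0
  | pre, y :: ys => (pre.countP (fun x => is_beautiful_string (x ++ y)) : Int) + pvPairT (pre ++ [y]) ys

theorem pvNmask_foldl (w : List Char) (a : Nat) :
    w.foldl (fun m c => m ^^^ (2 ^ c.toNat)) a = a ^^^ pvNmask w := by
  induction w generalizing a with
  | nil => simp [pvNmask]
  | cons c w ih =>
    have h0 : pvNmask (c :: w) = 2 ^ c.toNat ^^^ pvNmask w := by
      show List.foldl _ (0 ^^^ 2 ^ c.toNat) w = _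
      rw [Nat.zero_xor, ih]
    rw [List.foldl_cons, ih, h0, Nat.xor_assoc]

theorem pvNmask_cons (c : Char) (w : List Char) :
    pvNmask (c :: w) = 2 ^ c.toNat ^^^ pvNmask w := by
  show List.foldl _ (0 ^^^ 2 ^ c.toNat) w = _
  rw [Nat.zero_xor, pvNmask_foldl]

theorem pvStrMask_eq (s : String) : pvStrMask s = ((pvNmask s.toList : Nat) : Int) := by
  unfold pvStrMask pvNmask
  generalize s.toList = w
  suffices h : ∀ (a : Nat), w.foldl (fun m ch => PySem.Int.bxor m ((1 : Int) <<< ch.toNat)) (a : Int)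
      = ((w.foldl (fun m c => m ^^^ (2 ^ c.toNat)) a : Nat) : Int) by
    simpa using h 0
  induction w with
  | nil => simp
  | cons c w ih =>
    intro a
    simp only [List.foldl_cons]
    rw [Int.one_shiftLeft, PySem.Int.bxor_natCast, ih]

theorem pvNmask_append (u v : List Char) : pvNmask (u ++ v) = pvNmask u ^^^ pvNmask v := by
  show List.foldl _ _ _ = _
  rw [List.foldl_append]
  show List.foldl _ (pvNmask u) v = _
  rw [pvNmask_foldl]

theorem pvNmask_testBit (w : List Char) (b : Nat) :
    (pvNmask w).testBit b = decide (w.countP (fun c => c.toNat == b) % 2 = 1) := by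
  induction w with
  | nil => simp [pvNmask]
  | cons c w ih =>
    rw [pvNmask_cons, Nat.testBit_xor, ih, Nat.testBit_two_pow, List.countP_cons]
    by_cases h : c.toNat = b
    · simp only [h, beq_self_eq_true, if_pos, decide_true]
      rcases Nat.even_or_odd (w.countP (fun c => c.toNat == b)) with he | ho
      · have : w.countP (fun c => c.toNat == b) % 2 = 0 := Nat.even_iff.mp he
        simp [this, Nat.add_mod]
      · have : w.countP (fun c => c.toNat == b) % 2 = 1 := Nat.odd_iff.mp ho
        simp [this, Nat.add_mod]
    · have hb : (c.toNat == b) = false := by simpa using h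
      simp [hb, h]

theorem pv_char_countP (w : List Char) (c : Char) :
    w.countP (fun x => x.toNat == c.toNat) = w.count c := by
  rw [List.count_eq_countP]
  apply List.countP_congr
  intro x _
  constructor
  · intro h; simpa using Char.ext (UInt32.toNat_inj.mp (by simpa using h))
  · intro h; have : x = c := by simpa using h
    simp [this]

theorem pvNmask_testBit_iff (w : List Char) (b : Nat) :
    (pvNmask w).testBit b = true ↔ ∃ c, c ∈ w ∧ c.toNat = b ∧ w.count c % 2 = 1 := by
  rw [pvNmask_testBit, decide_eq_true_eq]
  constructor
  · intro h
    have hpos : 0 < w.countP (fun c => c.toNat == b) := by omega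
    obtain ⟨c, hc, hcb⟩ := List.countP_pos_iff.mp hpos
    have hb : c.toNat = b := by simpa using hcb
    refine ⟨c, hc, hb, ?_⟩
    rw [← pv_char_countP w c]
    subst hb
    exact h
  · rintro ⟨c, hc, hb, hodd⟩
    subst hb
    rw [pv_char_countP w c]
    exact hodd

theorem pv_is_beautiful_eq (s : String) :
    is_beautiful_string s = decide ((PySem.Set.ofList s.toList).countP (fun c => s.toList.count c % 2 == 1) ≤ 1) := by
  unfold is_beautiful_string
  simp only [PySem.Dict.foldl_insert_getD_add_one_eq_counter, PySem.List.foldl_count_if]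
  have hv : (PySem.Dict.counter s.toList).values
      = (PySem.Set.ofList s.toList).map (fun k => ((s.toList.count k : Nat) : Int)) := by
    show (PySem.Dict.counter s.toList).items.map (·.2) = _
    rw [PySem.Dict.items_counter, List.map_map]
    rfl
  rw [hv, List.countP_map]
  have hp : ∀ k : Char, ((fun v => PySem.Int.mod v 2 != 0) ∘ (fun k => ((s.toList.count k : Nat) : Int))) k
      = (fun c => s.toList.count c % 2 == 1) k := by
    intro k
    simp only [Function.comp_apply]
    have : PySem.Int.mod ((s.toList.count k : Nat) : Int) 2 = ((s.toList.count k % 2 : Nat) : Int) := by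
      exact_mod_cast PySem.Int.mod_natCast (s.toList.count k) 2
    rw [this]
    rcases Nat.mod_two_eq_zero_or_one (s.toList.count k) with h | h <;> simp [h]
  rw [List.countP_congr (fun x _ => by rw [hp x])]
  simp only [zero_add, decide_eq_decide]
  omega

theorem pv_char_inj (a b : Char) (h : a.toNat = b.toNat) : a = b :=
  Char.ext (UInt32.toNat_inj.mp h)

theorem pv_key_iff (w : List Char) (hw : ∀ c ∈ w, c.toNat < 128) :
    ((PySem.Set.ofList w).countP (fun c => w.count c % 2 == 1) ≤ 1)
      ↔ (pvNmask w = 0 ∨ ∃ b, b < 128 ∧ pvNmask w = 2 ^ b) := by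
  have hbit : ∀ b : Nat, (pvNmask w).testBit b = true
      ↔ ∃ c ∈ (PySem.Set.ofList w).filter (fun c => w.count c % 2 == 1), c.toNat = b := by
    intro b
    rw [pvNmask_testBit_iff]
    constructor
    · rintro ⟨c, hc, hcb, hodd⟩
      exact ⟨c, List.mem_filter.mpr ⟨(PySem.Set.mem_ofList w c).mpr hc, by simpa using hodd⟩, hcb⟩
    · rintro ⟨c, hc, hcb⟩
      obtain ⟨hcw, hodd⟩ := List.mem_filter.mp hc
      exact ⟨c, (PySem.Set.mem_ofList w c).mp hcw, hcb, by simpa using hodd⟩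
  have hnd : ((PySem.Set.ofList w).filter (fun c => w.count c % 2 == 1)).Nodup :=
    (PySem.Set.nodup_ofList w).filter _
  rw [List.countP_eq_length_filter]
  rcases hL : (PySem.Set.ofList w).filter (fun c => w.count c % 2 == 1) with _ | ⟨c1, rest⟩
  · rw [hL] at hbit
    apply iff_of_true
    · simp
    · left
      apply Nat.eq_of_testBit_eq
      intro b
      rw [Nat.zero_testBit]
      by_contra hb
      obtain ⟨c, hc, _⟩ := (hbit b).mp (by simpa using hb)
      simp at hc
  · rcases rest with _ | ⟨c2, rest⟩
    · rw [hL] at hbit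
      apply iff_of_true
      · simp
      · right
        have hc1w : c1 ∈ w := by
          have := (hbit c1.toNat).mpr ⟨c1, by simp, rfl⟩
          obtain ⟨c, hc, hcb, _⟩ := pvNmask_testBit_iff w c1.toNat |>.mp this
          exact (pv_char_inj c c1 hcb) ▸ hc
        refine ⟨c1.toNat, hw c1 hc1w, ?_⟩
        apply Nat.eq_of_testBit_eq
        intro b
        rw [Nat.testBit_two_pow]
        by_cases hb : c1.toNat = b
        · rw [(hbit b).mpr ⟨c1, by simp, hb⟩]
          simp [hb]
        · have hnb : ¬ (pvNmask w).testBit b = true := by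
            intro h
            obtain ⟨c, hc, hcb⟩ := (hbit b).mp h
            simp at hc
            exact hb (hc ▸ hcb)
          cases htb : (pvNmask w).testBit b
          · simp [hb]
          · exact absurd htb hnb
    · rw [hL] at hbit
      apply iff_of_false
      · simp
      · have hne : c1 ≠ c2 := by
          rw [hL] at hnd
          intro h
          exact (List.nodup_cons.mp hnd).1 (h ▸ List.mem_cons_self)
        have hb1 : (pvNmask w).testBit c1.toNat = true := (hbit _).mpr ⟨c1, by simp, rfl⟩
        have hb2 : (pvNmask w).testBit c2.toNat = true := (hbit _).mpr ⟨c2, by simp, rfl⟩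
        have hbne : c1.toNat ≠ c2.toNat := fun h => hne (pv_char_inj _ _ h)
        rintro (h0 | ⟨b, _, hpow⟩)
        · rw [h0, Nat.zero_testBit] at hb1; exact absurd hb1 (by simp)
        · rw [hpow, Nat.testBit_two_pow] at hb1 hb2
          have e1 : b = c1.toNat := of_decide_eq_true hb1
          have e2 : b = c2.toNat := of_decide_eq_true hb2
          exact hbne (e1 ▸ e2)

theorem pv_pair_iff (x y : String) (hx : pvDomStr x = true) (hy : pvDomStr y = true) :
    is_beautiful_string (x ++ y) = true
      ↔ (pvNmask x.toList = pvNmask y.toList ∨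
         ∃ b, b < 128 ∧ pvNmask x.toList = pvNmask y.toList ^^^ 2 ^ b) := by
  have hcode : ∀ c ∈ (x ++ y).toList, c.toNat < 128 := by
    intro c hc
    rw [String.toList_append, List.mem_append] at hc
    have hdc : pvDomChar c = true := by
      rcases hc with h | h
      · exact List.all_eq_true.mp hx c h
      · exact List.all_eq_true.mp hy c h
    unfold pvDomChar at hdc
    simp at hdc
    omega
  rw [pv_is_beautiful_eq, decide_eq_true_eq, pv_key_iff _ hcode]
  rw [show (x ++ y).toList = x.toList ++ y.toList from String.toList_append, pvNmask_append]
  constructor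
  · rintro (h0 | ⟨b, hb, hz⟩)
    · exact Or.inl (Nat.xor_eq_zero_iff.mp h0)
    · refine Or.inr ⟨b, hb, ?_⟩
      have : pvNmask x.toList ^^^ pvNmask y.toList ^^^ pvNmask y.toList = 2 ^ b ^^^ pvNmask y.toList := by
        rw [hz]
      rw [Nat.xor_assoc, Nat.xor_self, Nat.xor_zero] at this
      rw [this, Nat.xor_comm]
  · rintro (h0 | ⟨b, hb, hz⟩)
    · exact Or.inl (Nat.xor_eq_zero_iff.mpr h0)
    · refine Or.inr ⟨b, hb, ?_⟩
      rw [hz, Nat.xor_comm (pvNmask y.toList), Nat.xor_assoc, Nat.xor_self, Nat.xor_zero]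

theorem pv_sumG (box : List String) :
    ((List.range box.length).map (fun k =>
        (((box.drop (k+1)).countP (fun y => is_beautiful_string (box.getD k "" ++ y))) : Int))).sum
      = pvPairS box := by
  induction box with
  | nil => simp [pvPairS]
  | cons x xs ih =>
    rw [List.length_cons, List.range_succ_eq_map, List.map_cons, List.map_map, List.sum_cons]
    simp only [Function.comp_def, Nat.succ_eq_add_one]
    have : ∀ k : Nat, ((x :: xs).drop (k + 1 + 1)).countP (fun y => is_beautiful_string ((x :: xs).getD (k+1) "" ++ y))
        = (xs.drop (k+1)).countP (fun y => is_beautiful_string (xs.getD k "" ++ y)) := by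
      intro k; rfl
    simp only [this]
    rw [ih, pvPairS]
    simp

theorem pv_A_eq_pairS (box : List String) : count_beautiful_string_pairs box = pvPairS box := by
  unfold count_beautiful_string_pairs
  have hinner : ∀ (count : Int), ∀ i ∈ PySem.List.pyRange 0 ((box.length : Int) - 1),
      (PySem.List.pyRange (i + 1) (box.length : Int)).foldl (fun count j =>
        let concatenated_string := PySem.List.pyGetD box i "" ++ PySem.List.pyGetD box j ""
        if is_beautiful_string concatenated_string then count + 1 else count) count
      = count + (((box.drop (i+1).toNat).countP (fun y => is_beautiful_string (PySem.List.pyGetD box i "" ++ y))) : Int) := by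
    intro count i hi
    have h0 : (0:Int) ≤ i + 1 := by
      have := (PySem.List.mem_pyRange_one).mp hi
      omega
    rw [PySem.List.foldl_pyRange_pyGetD' box ""
      (fun acc y => if is_beautiful_string (PySem.List.pyGetD box i "" ++ y) then acc + 1 else acc) count h0,
      PySem.List.foldl_count_if]
  rw [PySem.List.foldl_congr_mem _ _
    (fun count i => count + (((box.drop (i+1).toNat).countP (fun y => is_beautiful_string (PySem.List.pyGetD box i "" ++ y))) : Int)) 0 hinner]
  rw [PySem.List.foldl_add]
  rw [PySem.List.pyRange_one, List.map_map]
  have hlen : ((box.length : Int) - 1 - 0).toNat = box.length - 1 := by omega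
  rw [hlen]
  have hterm : ∀ k ∈ List.range (box.length - 1),
      ((fun i : Int => (((box.drop (i+1).toNat).countP (fun y => is_beautiful_string (PySem.List.pyGetD box i "" ++ y))) : Int)) ∘ (fun k : Nat => (0:Int) + ↑k)) k
      = (((box.drop (k+1)).countP (fun y => is_beautiful_string (box.getD k "" ++ y))) : Int) := by
    intro k _
    simp only [Function.comp_apply, zero_add]
    have h1 : ((k:Int)+1).toNat = k+1 := by omega
    rw [PySem.List.pyGetD_natCast, h1]
  rw [List.map_congr_left hterm, zero_add]
  rcases box with _ | ⟨x, xs⟩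
  · simp [pvPairS]
  · have hstep : List.range (x :: xs).length = List.range ((x :: xs).length - 1) ++ [(x :: xs).length - 1] := by
      simp [List.range_succ]
    have := pv_sumG (x :: xs)
    rw [hstep, List.map_append, List.sum_append] at this
    have hlast : (((x :: xs).drop ((x :: xs).length - 1 + 1)).countP
        (fun y => is_beautiful_string ((x :: xs).getD ((x :: xs).length - 1) "" ++ y)) : Int) = 0 := by
      have : (x :: xs).drop ((x :: xs).length - 1 + 1) = [] := by
        apply List.drop_eq_nil_of_le; simp
      rw [this]; rfl
    simpa [hlast] using this

theorem pv_pairT_eq (ys : List String) (pre : List String) :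
    pvPairT pre ys
      = ((ys.map (fun y => ((pre.countP (fun x => is_beautiful_string (x ++ y))) : Int))).sum) + pvPairS ys := by
  induction ys generalizing pre with
  | nil => simp [pvPairT, pvPairS]
  | cons y ys ih =>
    rw [pvPairT, ih, List.map_cons, List.sum_cons]
    have hsplit : ∀ z : String, ((pre ++ [y]).countP (fun x => is_beautiful_string (x ++ z)) : Int)
        = (pre.countP (fun x => is_beautiful_string (x ++ z)) : Int)
          + (if is_beautiful_string (y ++ z) then 1 else 0) := by
      intro z
      rw [List.countP_append]
      push_cast
      congr 1
      simp [List.countP_cons]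
    simp only [hsplit]
    rw [PySem.List.sum_map_add_int, PySem.List.sum_map_ite_one_zero, pvPairS]
    ring

theorem pv_countP_or (l : List Nat) (p q : Nat → Bool) (h : ∀ x ∈ l, ¬(p x = true ∧ q x = true)) :
    l.countP (fun x => p x || q x) = l.countP p + l.countP q := by
  induction l with
  | nil => rfl
  | cons a l ih =>
    simp only [List.countP_cons]
    have := h a (by simp)
    have hrest : ∀ x ∈ l, ¬(p x = true ∧ q x = true) := fun x hx => h x (by simp [hx])
    rw [ih hrest]; cases hp : p a <;> cases hq : q a <;> simp_all <;> omega

theorem pv_sum_count (l : List Nat) (mn : Nat) (bs : List Nat)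
    (hnd : (bs.map (fun b => mn ^^^ 2 ^ b)).Nodup) :
    ((bs.map (fun b => ((l.count (mn ^^^ 2 ^ b) : Nat) : Int))).sum)
      = ((l.countP (fun x => bs.any (fun b => x == mn ^^^ 2 ^ b)) : Nat) : Int) := by
  induction bs with
  | nil => simp
  | cons b bs ih =>
    rw [List.map_cons] at hnd
    obtain ⟨hhead, hnd'⟩ := List.nodup_cons.mp hnd
    rw [List.map_cons, List.sum_cons, ih hnd']
    simp only [List.any_cons]
    have hdisj : ∀ x ∈ l, ¬((x == mn ^^^ 2 ^ b) = true ∧ (bs.any (fun b' => x == mn ^^^ 2 ^ b')) = true) := by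
      rintro x _ ⟨h1, h2⟩
      have hx : x = mn ^^^ 2 ^ b := by simpa using h1
      obtain ⟨b', hb', he⟩ := List.any_eq_true.mp h2
      have : mn ^^^ 2 ^ b = mn ^^^ 2 ^ b' := by rw [← hx]; simpa using he
      exact hhead (this ▸ List.mem_map_of_mem hb')
    rw [pv_countP_or l _ _ hdisj, List.count_eq_countP]
    push_cast
    ring

theorem pv_step (pre : List String) (y : String)
    (hpre : ∀ s ∈ pre, pvDomStr s = true) (hy : pvDomStr y = true) :
    (((pre.map (fun s => pvNmask s.toList)).count (pvNmask y.toList) : Nat) : Int)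
      + (((List.range 128).map (fun k => (((pre.map (fun s => pvNmask s.toList)).count (pvNmask y.toList ^^^ 2 ^ k) : Nat) : Int))).sum)
      = ((pre.countP (fun x => is_beautiful_string (x ++ y)) : Nat) : Int) := by
  set P := pre.map (fun s => pvNmask s.toList) with hP
  set mn := pvNmask y.toList with hmn
  have hinj : ∀ b b' : Nat, mn ^^^ 2 ^ b = mn ^^^ 2 ^ b' → b = b' := by
    intro b b' h
    have : (2:Nat) ^ b = 2 ^ b' := by
      have := congrArg (fun z => mn ^^^ z) h
      simpa [← Nat.xor_assoc, Nat.xor_self, Nat.zero_xor] using this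
    exact Nat.pow_right_injective (by norm_num) this
  have hnd : ((List.range 128).map (fun b => mn ^^^ 2 ^ b)).Nodup :=
    (List.nodup_range).map_on (fun b _ b' _ h => hinj b b' h)
  rw [pv_sum_count P mn (List.range 128) hnd]
  have hdisj : ∀ x ∈ P, ¬((x == mn) = true ∧ ((List.range 128).any (fun b => x == mn ^^^ 2 ^ b)) = true) := by
    rintro x _ ⟨h1, h2⟩
    obtain ⟨b, _, he⟩ := List.any_eq_true.mp h2
    have hx : x = mn := by simpa using h1
    have hme : mn = mn ^^^ 2 ^ b := by
      conv_lhs => rw [← hx]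
      simpa using he
    have h3 := congrArg (fun z => mn ^^^ z) hme
    simp only [← Nat.xor_assoc, Nat.xor_self, Nat.zero_xor] at h3
    exact absurd h3.symm (by positivity)
  have hor := pv_countP_or P _ _ hdisj
  have hpred : pre.countP (fun x => is_beautiful_string (x ++ y))
      = P.countP (fun a => a == mn || (List.range 128).any (fun b => a == mn ^^^ 2 ^ b)) := by
    rw [hP, List.countP_map]
    apply List.countP_congr
    intro x hx
    rw [pv_pair_iff x y (hpre x hx) hy]
    simp only [Function.comp_apply, List.any_eq_true, List.mem_range, beq_iff_eq, Bool.or_eq_true]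
    rw [hmn]
  rw [List.count_eq_countP, hpred]
  have hcast := congrArg (fun n : Nat => (n : Int)) hor
  push_cast at hcast
  omega

theorem pv_ins_counter (L : List Int) (m : Int) :
    (PySem.Dict.counter L).insert m ((PySem.Dict.counter L).getD m 0 + 1) = PySem.Dict.counter (L ++ [m]) := by
  conv_rhs => rw [← PySem.Dict.foldl_insert_getD_add_one_eq_counter]
  rw [List.foldl_append, PySem.Dict.foldl_insert_getD_add_one_eq_counter]
  rfl

theorem pv_Bloop (ys : List String) : ∀ (pre : List String) (acc : Int),
    (∀ s ∈ pre, pvDomStr s = true) → (∀ s ∈ ys, pvDomStr s = true) →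
    ((ys.map (fun s => ((pvNmask s.toList : Nat) : Int))).foldl
      (fun (st : PySem.Dict Int Int × Int) m =>
        let seen := st.1
        let count := st.2 + seen.getD m 0
        let count := (PySem.List.pyRange 0 128).foldl
          (fun c b => c + seen.getD (PySem.Int.bxor m ((1 : Int) <<< b.toNat)) 0) count
        (seen.insert m (seen.getD m 0 + 1), count))
      (PySem.Dict.counter (pre.map (fun s => ((pvNmask s.toList : Nat) : Int))), acc)).2
    = acc + pvPairT pre ys := by
  induction ys with
  | nil => intro pre acc _ _; simp [pvPairT]
  | cons y ys ih =>
    intro pre acc hpre hys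
    rw [List.map_cons, List.foldl_cons]
    have hcnt : ∀ v : Nat,
        (PySem.Dict.counter (pre.map (fun s => ((pvNmask s.toList : Nat) : Int)))).getD ((v : Nat) : Int) 0
        = (((pre.map (fun s => pvNmask s.toList)).count v : Nat) : Int) := by
      intro v
      rw [PySem.Dict.getD_counter]
      congr 1
      have : pre.map (fun s => ((pvNmask s.toList : Nat) : Int))
          = (pre.map (fun s => pvNmask s.toList)).map (fun n : Nat => (n : Int)) := by
        rw [List.map_map]
        rfl
      rw [this]
      exact List.count_map_of_injective _ _ (fun a b h => by exact_mod_cast h) v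
    have hinner :
        (PySem.List.pyRange 0 128).foldl
          (fun c b => c + (PySem.Dict.counter (pre.map (fun s => ((pvNmask s.toList : Nat) : Int)))).getD
            (PySem.Int.bxor ((pvNmask y.toList : Nat) : Int) ((1 : Int) <<< b.toNat)) 0)
          (acc + (PySem.Dict.counter (pre.map (fun s => ((pvNmask s.toList : Nat) : Int)))).getD ((pvNmask y.toList : Nat) : Int) 0)
        = acc + ((pre.countP (fun x => is_beautiful_string (x ++ y)) : Nat) : Int) := by
      have hr : PySem.List.pyRange 0 128 = (List.range 128).map (fun k : Nat => (0 : Int) + ↑k) := by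
        rw [PySem.List.pyRange_one]; norm_num; rfl
      rw [hr, List.foldl_map]
      have hfun : ∀ (c : Int) (k : Nat), k ∈ List.range 128 →
          c + (PySem.Dict.counter (pre.map (fun s => ((pvNmask s.toList : Nat) : Int)))).getD
            (PySem.Int.bxor ((pvNmask y.toList : Nat) : Int) ((1 : Int) <<< (((((0 : Int) + (k : Int)).toNat) : Nat) : Int))) 0
          = c + (((pre.map (fun s => pvNmask s.toList)).count (pvNmask y.toList ^^^ 2 ^ k) : Nat) : Int) := by
        intro c k _
        have h1 : ((0 : Int) + (k : Int)).toNat = k := by omega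
        rw [h1, Int.one_shiftLeft, PySem.Int.bxor_natCast, hcnt]
      rw [PySem.List.foldl_congr_mem _ _
        (fun c (k : Nat) => c + (((pre.map (fun s => pvNmask s.toList)).count (pvNmask y.toList ^^^ 2 ^ k) : Nat) : Int)) _ hfun]
      rw [PySem.List.foldl_add, hcnt (pvNmask y.toList)]
      have hs := pv_step pre y hpre (hys y (by simp))
      omega
    show (List.foldl _
        ((PySem.Dict.counter (pre.map (fun s => ((pvNmask s.toList : Nat) : Int)))).insert ((pvNmask y.toList : Nat) : Int)
            ((PySem.Dict.counter (pre.map (fun s => ((pvNmask s.toList : Nat) : Int)))).getD ((pvNmask y.toList : Nat) : Int) 0 + 1),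
         (PySem.List.pyRange 0 128).foldl
            (fun c b => c + (PySem.Dict.counter (pre.map (fun s => ((pvNmask s.toList : Nat) : Int)))).getD
              (PySem.Int.bxor ((pvNmask y.toList : Nat) : Int) ((1 : Int) <<< b.toNat)) 0)
            (acc + (PySem.Dict.counter (pre.map (fun s => ((pvNmask s.toList : Nat) : Int)))).getD ((pvNmask y.toList : Nat) : Int) 0))
        (ys.map (fun s => ((pvNmask s.toList : Nat) : Int)))).2 = acc + pvPairT pre (y :: ys)
    rw [hinner, pv_ins_counter,
      show (pre.map (fun s => ((pvNmask s.toList : Nat) : Int))) ++ [((pvNmask y.toList : Nat) : Int)]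
          = (pre ++ [y]).map (fun s => ((pvNmask s.toList : Nat) : Int)) from by rw [List.map_append]; rfl]
    rw [ih (pre ++ [y]) _ (by
        intro s hs
        rcases List.mem_append.mp hs with h | h
        · exact hpre s h
        · have hsy : s = y := by simpa using h
          rw [hsy]; exact hys y (by simp))
      (fun s hs => hys s (by simp [hs]))]
    rw [pvPairT]
    ring

theorem pv_B_eq_pairT (box : List String) (hdom : ∀ s ∈ box, pvDomStr s = true) :
    count_beautiful_string_pairs_alt box = pvPairT [] box := by
  show ((box.foldl (fun acc s => acc ++ [pvStrMask s]) []).foldl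
      (fun (st : PySem.Dict Int Int × Int) m =>
        let seen := st.1
        let count := st.2 + seen.getD m 0
        let count := (PySem.List.pyRange 0 128).foldl
          (fun c b => c + seen.getD (PySem.Int.bxor m ((1 : Int) <<< b.toNat)) 0) count
        (seen.insert m (seen.getD m 0 + 1), count)) (PySem.Dict.empty, 0)).2 = pvPairT [] box
  rw [PySem.List.foldl_append_singleton_eq_map, List.nil_append,
    List.map_congr_left (fun s _ => pvStrMask_eq s)]
  have h := pv_Bloop box [] 0 (by simp) hdom
  simpa using h

-- ===== VERDICT (by name: the statement is the Claim_ definition above) =====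
theorem count_beautiful_string_pairs_spec : Claim_equal_count_beautiful_string_pairs := by
  intro box hdom
  unfold Spec_count_beautiful_string_pairs
  have hd : ∀ s ∈ box, pvDomStr s = true := List.all_eq_true.mp hdom
  rw [pv_A_eq_pairS, pv_B_eq_pairT box hd, pv_pairT_eq]
  simp
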